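-- pv_equiv track=rewrite | github.com/ferrier1/worksheet | bitewise.py | number_of_ips
-- ===== SOURCE A (Python) =====
-- def number_of_ips(wildcard):
--     wilc_base_2 = []
--     for oct in wildcard:
--         x = str(bin(oct))[2:]
--         wilc_base_2.append(x)
--     j = ''.join(wilc_base_2)
--     no_of_hosts = int(j, 2) - 1
--     return no_of_hosts
-- ===== SOURCE B (Python) =====
-- def number_of_ips(wildcard):
--     acc = 0
--     for oct in wildcard:
--         bits = oct.bit_length() or 1
--         acc = acc * 2 ** bits + oct
--     return acc - 1
-- ===== Notes on version B (the rewrite author's own statement) =====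
-- stated objective: simpler
-- what changed: Replaces building binary strings and re-parsing them with int(j,2) by a single arithmetic fold: shift the accumulator by each octet's bit width (bit_length, 1 for 0) and add the octet.
-- outside the precondition, e.g. on number_of_ips([]): A raises ValueError, B returns -1; on number_of_ips([-3]): A raises ValueError, B returns -4; on number_of_ips([0, -2]): A returns 1, B returns -3
import Mathlib
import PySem

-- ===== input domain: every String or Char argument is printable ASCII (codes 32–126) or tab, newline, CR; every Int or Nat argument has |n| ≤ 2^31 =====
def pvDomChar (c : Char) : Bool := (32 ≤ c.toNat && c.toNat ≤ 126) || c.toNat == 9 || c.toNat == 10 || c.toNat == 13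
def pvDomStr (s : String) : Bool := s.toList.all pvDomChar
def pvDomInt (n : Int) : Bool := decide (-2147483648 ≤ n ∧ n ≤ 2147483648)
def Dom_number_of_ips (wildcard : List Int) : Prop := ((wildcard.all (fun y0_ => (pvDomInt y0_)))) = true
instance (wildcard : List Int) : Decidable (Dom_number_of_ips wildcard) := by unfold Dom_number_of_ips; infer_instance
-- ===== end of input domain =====

-- B replaces A's build-binary-strings-then-reparse with one arithmetic fold (simpler; same cost).

-- ===== PORT A =====
-- digits of bin(n) after the '0b' prefix, for n > 0 (MSB first); [] for 0
def pvBinCore (n : Nat) : List Char :=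
  if h : n = 0 then []
  else pvBinCore (n / 2) ++ [if n % 2 = 1 then '1' else '0']
decreasing_by exact Nat.div_lt_self (Nat.pos_of_ne_zero h) (by norm_num)

-- str(bin(oct))[2:] : for oct ≥ 0 the binary digits ('0' for 0); for oct < 0 Python gives 'b'+digits
def pvBinSlice (o : Int) : List Char :=
  if o < 0 then 'b' :: pvBinCore (-o).toNat
  else if o = 0 then ['0'] else pvBinCore o.toNat

-- one step of int(j, 2): accumulate a binary digit, none on any other character (ValueError)
def pvStep (acc : Option Nat) (c : Char) : Option Nat :=
  acc.bind (fun a => if c = '0' then some (a * 2) else if c = '1' then some (a * 2 + 1) else none)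

-- int(j, 2): ValueError (none) on the empty string or a non-digit character
def pvParseBin (l : List Char) : Option Nat :=
  if l = [] then none else l.foldl pvStep (some 0)

def number_of_ips (wildcard : List Int) : Int :=
  let wilc_base_2 := wildcard.foldl (fun ls o => ls ++ [pvBinSlice o]) []
  let j := wilc_base_2.flatten
  match pvParseBin j with
  | some v => (v : Int) - 1
  | none => 0   -- unreachable inside Pre_ (int(j,2) raised)

-- ===== PORT B =====
-- oct.bit_length()
def pvBitLen (n : Nat) : Nat :=
  if h : n = 0 then 0 else pvBitLen (n / 2) + 1
decreasing_by exact Nat.div_lt_self (Nat.pos_of_ne_zero h) (by norm_num)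

def number_of_ips_alt (wildcard : List Int) : Int :=
  (wildcard.foldl
    (fun acc o =>
      let b := pvBitLen o.toNat
      let bits := if b = 0 then 1 else b   -- oct.bit_length() or 1
      acc * 2 ^ bits + o)
    0) - 1

-- ===== PRECONDITION & SPEC =====
-- Pre_ excludes the empty list, on which A raises ValueError (int('',2)), and lists with a
-- negative octet — outside the natural domain of a wildcard mask; there A usually raises
-- ValueError ('b' in the joined string), returning only when the join happens to spell a
-- '0b'-prefixed literal that int(j,2) accepts.
def Pre_number_of_ips (wildcard : List Int) : Prop :=
  wildcard ≠ [] ∧ ∀ o ∈ wildcard, 0 ≤ o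
instance (wildcard : List Int) : Decidable (Pre_number_of_ips wildcard) := by
  unfold Pre_number_of_ips; infer_instance

def pvWitness_number_of_ips : List Int := [0, 255]

def Spec_number_of_ips (wildcard : List Int) (out : Int) : Prop := out = number_of_ips_alt wildcard
instance (wildcard : List Int) (out : Int) : Decidable (Spec_number_of_ips wildcard out) := by unfold Spec_number_of_ips; infer_instance

-- ===== CLAIM (what is proved, stated in full; the proofs are below) =====
def Claim_equal_number_of_ips : Prop := ∀ (wildcard : List Int), Dom_number_of_ips wildcard → Pre_number_of_ips wildcard → Spec_number_of_ips wildcard (number_of_ips wildcard)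

-- ===== LEMMAS AND PROOFS =====

-- value of the B-side fold step on Nat
def pvG (a : Nat) (o : Int) : Nat :=
  a * 2 ^ (if pvBitLen o.toNat = 0 then 1 else pvBitLen o.toNat) + o.toNat

theorem pvBitLen_succ (n : Nat) (h : n ≠ 0) : pvBitLen n = pvBitLen (n / 2) + 1 := by
  rw [pvBitLen]; simp [h]

theorem pvBinCore_parse (n : Nat) (h : n ≠ 0) (acc : Nat) :
    (pvBinCore n).foldl pvStep (some acc) = some (acc * 2 ^ pvBitLen n + n) := by
  induction n using Nat.strong_induction_on generalizing acc with
  | _ n ih =>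
    rw [pvBinCore]; simp only [h, dite_false]
    rw [List.foldl_append]
    by_cases h2 : n / 2 = 0
    · have hn : n = 1 := by omega
      subst hn
      simp [pvBinCore, pvStep, pvBitLen]
    · rw [ih (n / 2) (Nat.div_lt_self (Nat.pos_of_ne_zero h) (by norm_num)) h2 acc]
      rw [pvBitLen_succ n h]
      have hmod : n % 2 = 0 ∨ n % 2 = 1 := by omega
      rcases hmod with hm | hm <;>
        simp [pvStep, hm, pow_succ] <;> ring_nf <;> omega

theorem pvBinSlice_parse (o : Int) (ho : 0 ≤ o) (acc : Nat) :
    (pvBinSlice o).foldl pvStep (some acc) = some (pvG acc o) := by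
  unfold pvBinSlice pvG
  have hno : ¬ o < 0 := not_lt.mpr ho
  by_cases h0 : o = 0
  · subst h0; simp [pvStep, pvBitLen]
  · have hn : o.toNat ≠ 0 := by
      intro hc; apply h0; omega
    simp only [hno, if_false, h0]
    have hb : pvBitLen o.toNat ≠ 0 := by rw [pvBitLen_succ _ hn]; omega
    rw [pvBinCore_parse o.toNat hn acc]
    simp [hb]

theorem pvBinSlice_ne_nil (o : Int) : pvBinSlice o ≠ [] := by
  unfold pvBinSlice
  split
  · simp
  · split
    · simp
    · rw [pvBinCore]
      have : o.toNat ≠ 0 := by omega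
      simp [this]

theorem pvFlatten_parse (l : List Int) (acc : Nat) (h : ∀ o ∈ l, 0 ≤ o) :
    ((l.map pvBinSlice).flatten).foldl pvStep (some acc) = some (l.foldl pvG acc) := by
  induction l generalizing acc with
  | nil => simp
  | cons o rest ih =>
    simp only [List.map_cons, List.flatten_cons, List.foldl_append, List.foldl_cons]
    rw [pvBinSlice_parse o (h o (by simp)) acc]
    exact ih (pvG acc o) (fun x hx => h x (by simp [hx]))

theorem pvIntFold (l : List Int) (acc : Nat) (h : ∀ o ∈ l, 0 ≤ o) :
    l.foldl (fun acc o => (acc * 2 ^ if pvBitLen o.toNat = 0 then 1 else pvBitLen o.toNat) + o)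
      (acc : Int) = ((l.foldl pvG acc : Nat) : Int) := by
  induction l generalizing acc with
  | nil => simp
  | cons o rest ih =>
    simp only [List.foldl_cons]
    have ho : 0 ≤ o := h o (by simp)
    have : ((acc : Int) * 2 ^ (if pvBitLen o.toNat = 0 then 1 else pvBitLen o.toNat) + o)
        = ((pvG acc o : Nat) : Int) := by
      unfold pvG; push_cast; rw [Int.toNat_of_nonneg ho]
    rw [this, ih (pvG acc o) (fun x hx => h x (by simp [hx]))]

theorem pvFoldl_append_eq_map (l : List Int) :
    l.foldl (fun ls o => ls ++ [pvBinSlice o]) [] = l.map pvBinSlice := by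
  suffices h : ∀ init, l.foldl (fun ls o => ls ++ [pvBinSlice o]) init = init ++ l.map pvBinSlice by
    simpa using h []
  induction l with
  | nil => simp
  | cons o rest ih => intro init; simp [ih]

-- ===== VERDICT (by name: the statement is the Claim_ definition above) =====
theorem number_of_ips_spec : Claim_equal_number_of_ips := by
  intro wildcard _ hpre
  obtain ⟨hne, hnn⟩ := hpre
  unfold Spec_number_of_ips number_of_ips number_of_ips_alt
  simp only [pvFoldl_append_eq_map]
  have hflat : (wildcard.map pvBinSlice).flatten ≠ [] := by
    cases wildcard with
    | nil => exact absurd rfl hne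
    | cons o rest =>
      simp only [List.map_cons, List.flatten_cons, ne_eq, List.append_eq_nil_iff]
      intro ⟨h1, _⟩; exact pvBinSlice_ne_nil o h1
  unfold pvParseBin
  rw [if_neg hflat, pvFlatten_parse wildcard 0 hnn]
  simp only []
  have h := pvIntFold wildcard 0 hnn
  push_cast at h
  rw [← h]
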